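-- pv_equiv track=rewrite | github.com/voting-tools/pref_voting | pref_voting/helper.py | enumerate_compositions
-- ===== SOURCE A (Python) =====
-- def compositions(n):
--     """Generates all compositions of the integer n. Adapted from https://stackoverflow.com/questions/10244180/python-generating-integer-partitions."""
--
--     a = [0 for i in range(n + 1)]
--     k = 1
--     a[0] = 0
--     a[1] = n
--     while k != 0:
--         x = a[k - 1] + 1
--         y = a[k] - 1
--         k -= 1
--         while 1 <= y:
--             a[k] = x
--             x = 1
--             y -= x
--             k += 1
--         a[k] = x + y
--         yield a[:k + 1]
--
-- def enumerate_compositions(int_list):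
--     """Given a list of integers, enumerate all the compositions of the integers."""
--
--     first_int = int_list[0]
--
--     if len(int_list) == 1:
--         for composition in compositions(first_int):
--             yield [composition]
--
--     else:
--         for composition in compositions(first_int):
--             for comps in enumerate_compositions(int_list[1:]):
--                 yield [composition] + comps
-- ===== SOURCE B (Python) =====
-- from itertools import product
--
--
-- def compositions_list(n):
--     """All compositions of n in the same (lexicographic) order, built bottom-up by DP."""
--     table = [[[]]]
--     for m in range(1, n + 1):
--         table.append([[i] + rest for i in range(1, m + 1) for rest in table[m - i]])
--     return table[n]
--
--
-- def enumerate_compositions(int_list):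
--     comp_lists = [compositions_list(x) for x in int_list]
--     for combo in product(*comp_lists):
--         yield list(combo)
-- ===== Notes on version B (the rewrite author's own statement) =====
-- stated objective: alternative
-- what changed: Replaces the self-recursion over int_list[1:] with nested composition generators by one flat Cartesian-product iteration over per-integer composition lists, each built bottom-up by dynamic programming instead of A's in-place lexicographic-successor state machine.
import Mathlib
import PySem

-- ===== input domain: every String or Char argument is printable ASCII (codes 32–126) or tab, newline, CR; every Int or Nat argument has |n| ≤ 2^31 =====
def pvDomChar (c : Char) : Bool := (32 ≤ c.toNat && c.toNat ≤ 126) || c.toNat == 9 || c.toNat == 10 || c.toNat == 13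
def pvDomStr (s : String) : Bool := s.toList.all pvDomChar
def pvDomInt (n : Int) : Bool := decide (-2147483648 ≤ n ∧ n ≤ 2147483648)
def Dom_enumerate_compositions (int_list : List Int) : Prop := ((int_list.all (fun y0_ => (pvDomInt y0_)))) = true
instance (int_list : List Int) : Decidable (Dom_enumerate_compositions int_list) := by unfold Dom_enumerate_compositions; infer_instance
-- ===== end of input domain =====

-- B replaces A's recursive nesting of composition generators by one flat Cartesian-product
-- iteration over per-integer composition lists built bottom-up by dynamic programming
-- (alternative decomposition, same cost; return-value equivalence, no arguments are mutated).


-- ===== PORT A =====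
-- inner loop of compositions: `while 1 <= y: a[k] = x; x = 1; y -= x; k += 1`
def pvInnerA (a : List Int) (k : Nat) (x y : Int) : List Int × Nat × Int × Int :=
  if h : 1 ≤ y then pvInnerA (a.set k x) (k + 1) 1 (y - 1) else (a, k, x, y)
termination_by y.toNat
decreasing_by omega

-- outer loop `while k != 0`, collecting the yields; the fuel only makes the recursion
-- total (2^n iterations are proved sufficient below); indices are in range on inputs Pre_ admits
def pvOuterA (a : List Int) (k : Nat) : Nat → List (List Int)
  | 0 => []
  | fuel + 1 =>
    if k = 0 then []
    else
      let x := a.getD (k - 1) 0 + 1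
      let y := a.getD k 0 - 1
      let r := pvInnerA a (k - 1) x y
      let a2 := r.1.set r.2.1 (r.2.2.1 + r.2.2.2)
      (a2.take (r.2.1 + 1)) :: pvOuterA a2 r.2.1 fuel

def compositionsA (n : Int) : List (List Int) :=
  let a := List.replicate (n + 1).toNat 0   -- [0 for i in range(n+1)]
  let a := a.set 0 0                        -- a[0] = 0
  let a := a.set 1 n                        -- a[1] = n  (raises for n <= 0: excluded by Pre_)
  pvOuterA a 1 (2 ^ n.toNat)

def enumerate_compositions : List Int → List (List (List Int))
  | [] => []                                -- int_list[0] raises IndexError; excluded by Pre_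
  | [x] => (compositionsA x).map (fun c => [c])
  | x :: y :: rest =>
      (compositionsA x).flatMap (fun c =>
        (enumerate_compositions (y :: rest)).map (fun cs => c :: cs))

-- ===== PORT B =====
-- table[m] = all compositions of m, built bottom-up (Source B's compositions_list)
def compositions_list (n : Int) : List (List Int) :=
  let table := (PySem.List.pyRange 1 (n + 1) 1).foldl
    (fun table m =>
      table ++ [(PySem.List.pyRange 1 (m + 1) 1).flatMap
        (fun i => (table.getD (m - i).toNat []).map (fun rest => i :: rest))])
    [[[]]]
  table.getD n.toNat []   -- table[n]; the index is in range for the n >= 1 Pre_ admits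

-- itertools.product(*comp_lists), every tuple materialised as a list
def pvProd : List (List (List Int)) → List (List (List Int))
  | [] => [[]]
  | l :: ls => l.flatMap (fun c => (pvProd ls).map (fun t => c :: t))

def enumerate_compositions_alt (int_list : List Int) : List (List (List Int)) :=
  pvProd (int_list.map compositions_list)

-- ===== PRECONDITION & SPEC =====
-- Pre_ excludes exactly the inputs on which Python A raises IndexError: the empty list
-- (int_list[0]) and lists with an entry <= 0 (a[1] = n inside compositions).
def Pre_enumerate_compositions (int_list : List Int) : Prop :=
  int_list ≠ [] ∧ ∀ x ∈ int_list, 1 ≤ x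
instance (int_list : List Int) : Decidable (Pre_enumerate_compositions int_list) := by
  unfold Pre_enumerate_compositions; infer_instance

def pvWitness_enumerate_compositions : List Int := [2, 1]

def Spec_enumerate_compositions (int_list : List Int) (out : List (List (List Int))) : Prop := out = enumerate_compositions_alt int_list
instance (int_list : List Int) (out : List (List (List Int))) : Decidable (Spec_enumerate_compositions int_list out) := by unfold Spec_enumerate_compositions; infer_instance

-- ===== CLAIM (what is proved, stated in full; the proofs are below) =====
def Claim_equal_enumerate_compositions : Prop := ∀ (int_list : List Int), Dom_enumerate_compositions int_list → Pre_enumerate_compositions int_list → Spec_enumerate_compositions int_list (enumerate_compositions int_list)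

-- ===== LEMMAS AND PROOFS =====

-- the common specification: compositions of n, in the lexicographic order both programs produce
def compsSpec : Nat → List (List Int)
  | 0 => [[]]
  | n + 1 => (List.range (n + 1)).flatMap
      (fun j => (compsSpec (n - j)).map (fun r => ((j : Int) + 1) :: r))
decreasing_by exact Nat.lt_succ_of_le (Nat.sub_le n j)

----------------------------------------------------------------
-- B-side: the DP table computes compsSpec
----------------------------------------------------------------

lemma pyRange_one_eq_map : ∀ t : Nat, PySem.List.pyRange 1 ((t : Int) + 1) 1 = (List.range t).map (fun j : Nat => (j : Int) + 1) := by
  intro t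
  induction t with
  | zero => simp [PySem.List.pyRange_one_eq_nil]
  | succ t ih =>
    have h1 : ((t + 1 : Nat) : Int) + 1 = ((t : Int) + 1) + 1 := by push_cast; ring
    rw [h1, PySem.List.pyRange_one_succ_right (by omega), ih, List.range_succ]
    simp

lemma foldB (t : Nat) :
    ((List.range t).map (fun j : Nat => (j : Int) + 1)).foldl
      (fun table m =>
        table ++ [(PySem.List.pyRange 1 (m + 1) 1).flatMap
          (fun i => (table.getD (m - i).toNat []).map (fun rest => i :: rest))])
      [[[]]]
    = (List.range (t + 1)).map compsSpec := by
  induction t with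
  | zero => simp [compsSpec]
  | succ t ih =>
    rw [List.range_succ (n := t), List.map_append, List.foldl_append, ih,
      List.range_succ (n := t + 1), List.map_append]
    simp only [List.map_cons, List.map_nil, List.foldl_cons, List.foldl_nil]
    congr 1
    -- the new entry is compsSpec (t+1)
    have hrange : PySem.List.pyRange 1 (((t : Int) + 1) + 1) 1 = (List.range (t + 1)).map (fun j : Nat => (j : Int) + 1) := by
      exact_mod_cast pyRange_one_eq_map (t + 1)
    rw [hrange, List.flatMap_map]
    show [_] = [compsSpec (t + 1)]
    congr 1
    rw [compsSpec]
    apply List.flatMap_congr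
    intro j hj
    have hj' : j < t + 1 := List.mem_range.mp hj
    have hidx : (((t : Int) + 1) - ((j : Int) + 1)).toNat = t - j := by omega
    rw [hidx, PySem.List.getD_map_range compsSpec (t + 1) (t - j) [] (by omega)]

lemma B_comps (n : Int) (hn : 0 ≤ n) : compositions_list n = compsSpec n.toNat := by
  obtain ⟨t, rfl⟩ : ∃ t : Nat, n = (t : Int) := ⟨n.toNat, by omega⟩
  unfold compositions_list
  rw [pyRange_one_eq_map, foldB]
  simp only [Int.toNat_natCast]
  exact PySem.List.getD_map_range compsSpec (t + 1) t [] (by omega)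

----------------------------------------------------------------
-- A-side: the lexicographic-successor machine
----------------------------------------------------------------

def pvSucc (c : List Int) : List Int :=
  match c.reverse with
  | v :: u :: p => p.reverse ++ (u + 1) :: List.replicate (v - 1).toNat 1
  | _ => c

lemma succ_spec (p : List Int) (u v : Int) :
    pvSucc (p ++ [u, v]) = p ++ (u + 1) :: List.replicate (v - 1).toNat 1 := by
  unfold pvSucc
  rw [show (p ++ [u, v]).reverse = v :: u :: p.reverse by simp]
  simp

def pvG : List Int → Nat
  | [] => 0
  | [_] => 0
  | _ :: y :: rest => 2 ^ (((y :: rest).sum).toNat - 1) + pvG (y :: rest)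

def pvGp : List Int → Int → Nat
  | [], _ => 0
  | x :: p, t => 2 ^ ((p.sum + t).toNat - 1) + pvGp p t

lemma g_split : ∀ (p r : List Int), r ≠ [] → pvG (p ++ r) = pvGp p r.sum + pvG r := by
  intro p
  induction p with
  | nil => intro r _; simp [pvGp]
  | cons x p ih =>
    intro r hr
    obtain ⟨z, zs, rfl⟩ : ∃ z zs, r = z :: zs := by
      cases r with | nil => exact absurd rfl hr | cons z zs => exact ⟨z, zs, rfl⟩
    obtain ⟨w, ws, hpr⟩ : ∃ w ws, p ++ z :: zs = w :: ws := by
      cases h : p ++ z :: zs with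
      | nil => simp at h
      | cons w ws => exact ⟨w, ws, rfl⟩
    rw [List.cons_append, hpr, pvG, ← hpr, ih (z :: zs) (by simp), pvGp]
    have : (p ++ z :: zs).sum = p.sum + (z :: zs).sum := List.sum_append ..
    rw [this]
    ring

lemma g_ones (m : Nat) (w : Int) : pvG (w :: List.replicate m 1) = 2 ^ m - 1 := by
  induction m generalizing w with
  | zero => simp [pvG]
  | succ m ih =>
    rw [List.replicate_succ, pvG, ih 1]
    have hsum : ((1 : Int) :: List.replicate m 1).sum = (m : Int) + 1 := by
      simp [List.sum_replicate]; omega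
    rw [hsum]
    have : ((m : Int) + 1).toNat - 1 = m := by omega
    rw [this]
    have : 1 ≤ 2 ^ m := Nat.one_le_two_pow
    omega

lemma g_succ (p : List Int) (u v : Int) (hv : 1 ≤ v) :
    pvG (p ++ [u, v]) = pvG (p ++ (u + 1) :: List.replicate (v - 1).toNat 1) + 1 := by
  rw [g_split p [u, v] (by simp), g_split p _ (by simp)]
  have hsum : ((u + 1) :: List.replicate (v - 1).toNat 1).sum = u + v := by
    simp [List.sum_replicate]
    omega
  rw [hsum]
  have h2 : ([u, v] : List Int).sum = u + v := by simp
  rw [h2, g_ones]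
  have hg2 : pvG [u, v] = 2 ^ ((v).toNat - 1) := by simp [pvG]
  rw [hg2]
  have he : v.toNat - 1 = (v - 1).toNat := by omega
  rw [he]
  have : 1 ≤ 2 ^ (v - 1).toNat := Nat.one_le_two_pow
  omega

lemma exists_last_two (c : List Int) (h : 2 ≤ c.length) :
    ∃ p u v, c = p ++ [u, v] := by
  obtain ⟨v, u, q, hc⟩ : ∃ v u q, c.reverse = v :: u :: q := by
    cases hr : c.reverse with
    | nil => simp at hr; subst hr; simp at h
    | cons v t =>
      cases t with
      | nil =>
        have : c = [v] := by rw [← c.reverse_reverse, hr]; rfl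
        subst this; simp at h
      | cons u q => exact ⟨v, u, q, rfl⟩
  refine ⟨q.reverse, u, v, ?_⟩
  rw [← c.reverse_reverse, hc]
  simp

lemma g_pos (c : List Int) (h2 : 2 ≤ c.length) : 1 ≤ pvG c := by
  obtain ⟨p, u, v, rfl⟩ := exists_last_two c h2
  rw [g_split p [u, v] (by simp)]
  have : pvG [u, v] = 2 ^ ((v).toNat - 1) := by simp [pvG]
  have h1 : 1 ≤ 2 ^ (v.toNat - 1) := Nat.one_le_two_pow
  omega

lemma g_succ_lt (c : List Int) (h2 : 2 ≤ c.length) (ht : ∀ x ∈ c.tail, 1 ≤ x) :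
    pvG (pvSucc c) < pvG c := by
  obtain ⟨p, u, v, rfl⟩ := exists_last_two c h2
  have hv : 1 ≤ v := by
    apply ht
    cases p with
    | nil => simp
    | cons a q => simp
  rw [succ_spec, g_succ p u v hv]
  omega

def pvT (c : List Int) : List (List Int) :=
  if h : 2 ≤ c.length ∧ ∀ x ∈ c.tail, 1 ≤ x then pvSucc c :: pvT (pvSucc c) else []
termination_by pvG c
decreasing_by exact g_succ_lt c h.1 h.2

def pvWrite : List Int → Nat → List Int → List Int
  | a, _, [] => a
  | a, k, h :: t => pvWrite (a.set k h) (k + 1) t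

lemma step_eq : ∀ (m : Nat) (y : Int), y.toNat = m → 0 ≤ y → ∀ (a : List Int) (k : Nat) (x : Int),
    (pvInnerA a k x y).1.set (pvInnerA a k x y).2.1
        ((pvInnerA a k x y).2.2.1 + (pvInnerA a k x y).2.2.2) = pvWrite a k (x :: List.replicate m 1)
    ∧ (pvInnerA a k x y).2.1 = k + m := by
  intro m
  induction m with
  | zero =>
    intro y hy hy0 a k x
    have hy' : y = 0 := by omega
    subst hy'
    rw [pvInnerA]
    simp [pvWrite]
  | succ m ih =>
    intro y hy hy0 a k x
    rw [pvInnerA, dif_pos (by omega : (1:Int) ≤ y)]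
    obtain ⟨h1, h2⟩ := ih (y - 1) (by omega) (by omega) (a.set k x) (k + 1) 1
    refine ⟨?_, by omega⟩
    rw [h1]
    rfl

lemma write_length : ∀ (l a : List Int) (k : Nat), (pvWrite a k l).length = a.length := by
  intro l
  induction l with
  | nil => intro a k; rfl
  | cons h t ih => intro a k; rw [pvWrite, ih]; simp

lemma write_take : ∀ (l a : List Int) (k : Nat), k + l.length ≤ a.length →
    (pvWrite a k l).take (k + l.length) = a.take k ++ l := by
  intro l
  induction l with
  | nil => intro a k h; simp [pvWrite]
  | cons x t ih =>
    intro a k h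
    rw [pvWrite]
    have hk : k < a.length := by simp at h; omega
    have h1 : (k + 1) + t.length ≤ (a.set k x).length := by simp at h ⊢; omega
    have h2 := ih (a.set k x) (k + 1) h1
    have hkl : k + (x :: t).length = (k + 1) + t.length := by simp; omega
    rw [hkl, h2]
    have : (a.set k x).take (k + 1) = a.take k ++ [x] := by
      apply List.ext_getElem
      · simp; omega
      · intro i hi1 hi2
        simp only [List.getElem_take, List.getElem_set]
        by_cases hik : i = k
        · subst hik
          simp [List.getElem_append_right, List.length_take, Nat.min_eq_left (le_of_lt hk)]
        · have hik' : i < k := by simp at hi1; omega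
          rw [List.getElem_append_left (by simp; omega)]
          simp [List.getElem_take]
          intro hh
          exact absurd hh (by omega)
    rw [this]
    simp

lemma sum_ge_len (l : List Int) (h : ∀ x ∈ l, 1 ≤ x) : (l.length : Int) ≤ l.sum := by
  induction l with
  | nil => simp
  | cons x t ih =>
    have h1 := h x (by simp)
    have h2 := ih (fun z hz => h z (by simp [hz]))
    simp only [List.length_cons, List.sum_cons]
    push_cast
    omega


lemma outer_eq : ∀ (fuel : Nat) (c a : List Int) (k : Nat),
    a.take (k + 1) = c → c.length = k + 1 →
    (∀ x ∈ c.tail, 1 ≤ x) → 0 ≤ c.headI →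
    (c.sum).toNat + 1 ≤ a.length → pvG c ≤ fuel →
    pvOuterA a k fuel = pvT c := by
  intro fuel
  induction fuel with
  | zero =>
    intro c a k htake hlen ht hh ha hfuel
    match k, hlen with
    | 0, hlen =>
      rw [pvT, dif_neg (by rw [hlen]; simp)]
      rfl
    | k + 1, hlen =>
      have := g_pos c (by omega)
      omega
  | succ fuel ih =>
    intro c a k htake hlen ht hh ha hfuel
    by_cases hk0 : k = 0
    · subst hk0
      rw [pvT, dif_neg (by rw [hlen]; simp)]
      rw [pvOuterA, if_pos rfl]
    · -- k ≥ 1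
      obtain ⟨p, u, v, rfl⟩ := exists_last_two c (by omega)
      have hplen : p.length = k - 1 := by simp at hlen; omega
      have hklen : k + 1 ≤ a.length := by
        have := congrArg List.length htake
        simp at this
        omega
      have hv : 1 ≤ v := by
        apply ht
        cases p <;> simp
      have hu : 0 ≤ u := by
        cases p with
        | nil => simpa using hh
        | cons z q => have : (1:Int) ≤ u := ht u (by simp); omega
      -- the two reads
      have hread : ∀ i, i < k + 1 → a.getD i 0 = (p ++ [u, v]).getD i 0 := by
        intro i hi
        rw [← htake]
        rw [List.getD_eq_getElem?_getD, List.getD_eq_getElem?_getD, List.getElem?_take_of_lt hi]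
      have hg1 : a.getD (k - 1) 0 = u := by
        rw [hread (k - 1) (by omega), List.getD_eq_getElem?_getD,
          List.getElem?_eq_getElem (by simp; omega)]
        simp only [Option.getD_some]
        rw [List.getElem_append_right (by omega)]
        simp [show k - 1 - p.length = 0 by omega]
      have hg2 : a.getD k 0 = v := by
        rw [hread k (by omega), List.getD_eq_getElem?_getD,
          List.getElem?_eq_getElem (by simp; omega)]
        simp only [Option.getD_some]
        rw [List.getElem_append_right (by omega)]
        simp [show k - p.length = 1 by omega]
      set m := (v - 1).toNat with hm
      obtain ⟨hs1, hs2⟩ := step_eq m (v - 1) rfl (by omega) a (k - 1) (u + 1)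
      -- bounds
      have hsumc : (p ++ [u, v]).sum = p.sum + u + v := by simp; ring
      have hpu : (k : Int) - 1 ≤ p.sum + u := by
        cases p with
        | nil => simp at hplen ⊢; omega
        | cons z q =>
          have hz : 0 ≤ z := by simpa using hh
          have hq : (q.length : Int) ≤ q.sum := sum_ge_len q (fun w hw => ht w (by simp [hw]))
          simp only [List.sum_cons]
          have hul : (1:Int) ≤ u := ht u (by simp)
          simp at hplen
          omega
      have hsum0 : 0 ≤ (p ++ [u, v]).sum := by rw [hsumc]; omega
      have hwb : (k - 1) + (m + 1) ≤ a.length := by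
        rw [hsumc] at ha
        omega
      -- the yielded composition
      have htk : a.take (k - 1) = p := by
        have h1 : a.take (k - 1) = (a.take (k + 1)).take (k - 1) := by
          rw [List.take_take]
          congr 1
          omega
        rw [h1, htake, List.take_append_of_le_length (by omega), List.take_of_length_le (by omega)]
      have hyield : (pvWrite a (k - 1) ((u + 1) :: List.replicate m 1)).take ((k - 1 + m) + 1)
          = p ++ (u + 1) :: List.replicate m 1 := by
        have := write_take ((u + 1) :: List.replicate m 1) a (k - 1) (by simpa using hwb)
        simp only [List.length_cons, List.length_replicate] at this
        rw [show (k - 1 + m) + 1 = k - 1 + (m + 1) by omega, this, htk]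
      -- unfold one outer step
      rw [pvOuterA, if_neg hk0]
      simp only [hg1, hg2]
      simp only [hs1]
      simp only [hs2]
      simp only [hyield]
      -- unfold one pvT step
      rw [pvT, dif_pos ⟨by simp only [List.length_append, List.length_cons, List.length_nil]; omega, ht⟩, succ_spec]
      congr 1
      -- apply the IH to the successor state
      apply ih (p ++ (u + 1) :: List.replicate m 1) _ _ hyield
      · simp; omega
      · intro z hz
        cases p with
        | nil =>
          have h3 : z ∈ List.replicate m 1 := by simpa using hz
          rw [List.eq_of_mem_replicate h3]
        | cons w q =>
          have hz' : z ∈ q ++ (u + 1) :: List.replicate m 1 := by simpa using hz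
          rcases List.mem_append.mp hz' with h1 | h2
          · exact ht z (by simp [h1])
          · rcases List.mem_cons.mp h2 with rfl | h3
            · omega
            · rw [List.eq_of_mem_replicate h3]
      · cases p with
        | nil => simp; omega
        | cons w q => simpa using hh
      · have hsum' : (p ++ (u + 1) :: List.replicate m 1).sum = (p ++ [u, v]).sum := by
          simp [List.sum_replicate, hsumc]
          omega
        rw [hsum', write_length]
        exact ha
      · have := g_succ p u v hv
        rw [← hm] at this
        omega

lemma A_eq_T (n : Int) (hn : 1 ≤ n) : compositionsA n = pvT [0, n] := by
  obtain ⟨t, ht, hnt⟩ : ∃ t : Nat, n = ((t + 1 : Nat) : Int) ∧ n.toNat = t + 1 :=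
    ⟨n.toNat - 1, by omega, by omega⟩
  unfold compositionsA
  have hrep : List.replicate (n + 1).toNat (0 : Int) = 0 :: 0 :: List.replicate t 0 := by
    rw [show (n + 1).toNat = t + 2 by omega]
    rfl
  rw [hrep]
  simp only [List.set]
  apply outer_eq (2 ^ n.toNat) [0, n] (0 :: n :: List.replicate t 0) 1
  · rfl
  · rfl
  · intro z hz
    simp at hz
    omega
  · simp
  · simp
    omega
  · have hG : pvG [0, n] = 2 ^ (n.toNat - 1) := by
      simp [pvG]
    rw [hG]
    exact Nat.pow_le_pow_right (by omega) (by omega)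

----------------------------------------------------------------
-- the successor stream is compsSpec
----------------------------------------------------------------

def pvGlist (w : Int) (m : Nat) : List (List Int) :=
  (w :: List.replicate m 1) :: pvT (w :: List.replicate m 1)

lemma succ_cons (x : Int) (rest : List Int) (h : 2 ≤ rest.length) :
    pvSucc (x :: rest) = x :: pvSucc rest := by
  obtain ⟨p, u, v, rfl⟩ := exists_last_two rest h
  rw [show x :: (p ++ [u, v]) = (x :: p) ++ [u, v] from rfl, succ_spec, succ_spec]
  rfl

lemma T_cons_single (s x : Int) (hs : 1 ≤ s) :
    pvT [x, s] = pvGlist (x + 1) ((s : Int).toNat - 1) := by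
  rw [pvT, dif_pos ⟨by simp, by intro z hz; simp at hz; omega⟩]
  have hsp := succ_spec [] x s
  simp only [List.nil_append] at hsp
  rw [hsp, pvGlist]
  have : ((s : Int)).toNat - 1 = (s - 1).toNat := by omega
  rw [this]

lemma T_cons : ∀ (g : Nat) (rest : List Int) (x : Int), pvG rest ≤ g → rest ≠ [] →
    (∀ z ∈ rest, 1 ≤ z) →
    pvT (x :: rest) = (pvT rest).map (x :: ·) ++ pvGlist (x + 1) ((rest.sum).toNat - 1) := by
  intro g
  induction g with
  | zero =>
    intro rest x hg hne hall
    match rest, hne with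
    | [s], _ =>
      rw [T_cons_single s x (hall s (by simp))]
      rw [pvT, dif_neg (by simp)]
      simp
    | r1 :: r2 :: r', _ =>
      have := g_pos (r1 :: r2 :: r') (by simp)
      omega
  | succ g ihg =>
    intro rest x hg hne hall
    match rest, hne with
    | [s], _ =>
      rw [T_cons_single s x (hall s (by simp))]
      rw [pvT, dif_neg (by simp)]
      simp
    | r1 :: r2 :: r', _ =>
      set rest := r1 :: r2 :: r' with hrest
      have hlen2 : 2 ≤ rest.length := by simp [hrest]
      have htail : ∀ z ∈ rest.tail, 1 ≤ z := fun z hz => hall z (List.mem_of_mem_tail hz)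
      obtain ⟨p, u, v, hpe⟩ := exists_last_two rest hlen2
      have hv : 1 ≤ v := hall v (by rw [hpe]; simp)
      have hu : 1 ≤ u := hall u (by rw [hpe]; simp)
      -- properties of the successor
      have hsucc : pvSucc rest = p ++ (u + 1) :: List.replicate (v - 1).toNat 1 := by
        rw [hpe, succ_spec]
      have hne' : pvSucc rest ≠ [] := by rw [hsucc]; simp
      have hall' : ∀ z ∈ pvSucc rest, 1 ≤ z := by
        intro z hz
        rw [hsucc] at hz
        rcases List.mem_append.mp hz with h1 | h2
        · exact hall z (by rw [hpe]; simp [h1])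
        · rcases List.mem_cons.mp h2 with rfl | h3
          · omega
          · rw [List.eq_of_mem_replicate h3]
      have hsum' : (pvSucc rest).sum = rest.sum := by
        rw [hsucc, hpe]
        simp [List.sum_replicate]
        omega
      have hglt : pvG (pvSucc rest) < pvG rest := g_succ_lt rest hlen2 htail
      have hT1 : pvT (x :: rest) = (x :: pvSucc rest) :: pvT (x :: pvSucc rest) := by
        rw [pvT, dif_pos ⟨by simp [hrest], by simpa using hall⟩, succ_cons x rest hlen2]
      have hT2 : pvT rest = pvSucc rest :: pvT (pvSucc rest) := by
        rw [pvT, dif_pos ⟨hlen2, htail⟩]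
      rw [hT1, ihg (pvSucc rest) x (by omega) hne' hall', hT2, hsum']
      simp

lemma G_spec : ∀ (m : Nat) (w : Int), 1 ≤ w →
    pvGlist w m = (List.range (m + 1)).flatMap
      (fun j => (compsSpec (m - j)).map (fun r => (w + (j : Int)) :: r)) := by
  intro m
  induction m with
  | zero =>
    intro w hw
    rw [pvGlist, pvT, dif_neg (by simp)]
    simp [compsSpec]
  | succ m ih =>
    intro w hw
    have hGone : pvGlist 1 m = compsSpec (m + 1) := by
      rw [ih 1 le_rfl, compsSpec]
      apply List.flatMap_congr
      intro j hj
      have : (fun r : List Int => ((1 : Int) + (j : Int)) :: r) = (fun r => ((j : Int) + 1) :: r) := by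
        funext r
        rw [Int.add_comm]
      rw [this]
    have hrep : ∀ z ∈ List.replicate (m + 1) (1 : Int), 1 ≤ z := by
      intro z hz
      rw [List.eq_of_mem_replicate hz]
    have hsum : ((List.replicate (m + 1) (1 : Int)).sum).toNat - 1 = m := by
      simp [List.sum_replicate]
    rw [pvGlist, T_cons (pvG (List.replicate (m + 1) (1:Int))) _ w le_rfl (by simp) hrep, hsum]
    rw [show List.replicate (m + 1) (1 : Int) = 1 :: List.replicate m 1 from List.replicate_succ ..]
    rw [show pvT (1 :: List.replicate m 1) = (pvGlist 1 m).tail from rfl, hGone]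
    have hhead : compsSpec (m + 1) = (1 :: List.replicate m 1) :: (compsSpec (m + 1)).tail := by
      rw [← hGone]
      rfl
    -- LHS = map (w :: ·) (compsSpec (m+1)) ++ pvGlist (w+1) m
    rw [List.range_succ_eq_map, List.flatMap_cons, List.flatMap_map]
    have hf0 : (compsSpec (m + 1 - 0)).map (fun r => (w + ((0 : Nat) : Int)) :: r)
        = (compsSpec (m + 1)).map (fun r => w :: r) := by
      norm_num
    rw [hf0]
    conv_rhs => rw [hhead]
    simp only [List.map_cons, List.cons_append]
    congr 2
    rw [ih (w + 1) (by omega)]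
    apply List.flatMap_congr
    intro j hj
    have h1 : m + 1 - Nat.succ j = m - j := by omega
    rw [h1]
    have : (fun r : List Int => (w + ((Nat.succ j : Nat) : Int)) :: r)
        = (fun r : List Int => ((w + 1) + (j : Int)) :: r) := by
      funext r
      push_cast
      ring_nf
    rw [this]

lemma G_one (m : Nat) : pvGlist 1 m = compsSpec (m + 1) := by
  rw [G_spec m 1 le_rfl, compsSpec]
  apply List.flatMap_congr
  intro j hj
  have : (fun r : List Int => ((1 : Int) + (j : Int)) :: r) = (fun r => ((j : Int) + 1) :: r) := by
    funext r
    rw [Int.add_comm]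
  rw [this]

lemma A_comps (n : Int) (hn : 1 ≤ n) : compositionsA n = compsSpec n.toNat := by
  rw [A_eq_T n hn]
  rw [pvT, dif_pos ⟨by simp, by intro z hz; simp at hz; omega⟩]
  have hsp := succ_spec [] 0 n
  simp only [List.nil_append, zero_add] at hsp
  rw [hsp]
  have : ((1:Int) :: List.replicate (n - 1).toNat 1) :: pvT (1 :: List.replicate (n - 1).toNat 1)
      = pvGlist 1 (n - 1).toNat := rfl
  rw [this, G_one]
  congr 1
  omega

----------------------------------------------------------------
-- assembly
----------------------------------------------------------------

lemma main_eq : ∀ (int_list : List Int), Pre_enumerate_compositions int_list →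
    enumerate_compositions int_list = enumerate_compositions_alt int_list := by
  intro l
  induction l with
  | nil => intro h; exact absurd rfl h.1
  | cons x rest ih =>
    intro h
    have hx : 1 ≤ x := h.2 x (by simp)
    cases rest with
    | nil =>
      show (compositionsA x).map (fun c => [c]) = pvProd ([x].map compositions_list)
      rw [A_comps x hx, ← B_comps x (by omega)]
      simp only [pvProd, List.map_cons, List.map_nil]
      induction compositions_list x with
      | nil => rfl
      | cons c cs ihc => simp_all
    | cons y rest' =>
      have ih' := ih ⟨by simp, fun z hz => h.2 z (List.mem_cons_of_mem x hz)⟩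
      show (compositionsA x).flatMap (fun c =>
          (enumerate_compositions (y :: rest')).map (fun cs => c :: cs))
        = pvProd ((x :: y :: rest').map compositions_list)
      rw [A_comps x hx, ← B_comps x (by omega), ih']
      rfl

-- ===== VERDICT (by name: the statement is the Claim_ definition above) =====
theorem enumerate_compositions_spec : Claim_equal_enumerate_compositions := by
  intro l _ hpre
  unfold Spec_enumerate_compositions
  exact main_eq l hpre
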